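-- pv_equiv track=rewrite | github.com/jiminkyung/Algorithm | Programmers/Lv0/조건에 맞게 수열 변환하기 2.py | solution
-- ===== SOURCE A (Python) =====
-- def solution(arr):
--     count = 0
--     while True:
--         temp = arr.copy()
--         for i in range(len(arr)):
--             if arr[i] >= 50 and arr[i] % 2 == 0:
--                 arr[i] //= 2
--             elif arr[i] < 50 and arr[i] % 2 == 1:
--                 arr[i] = arr[i] * 2 + 1
--         if temp == arr:
--             break
--         count += 1
--     return count
-- ===== SOURCE B (Python) =====
-- def solution(arr):
--     best = 0
--     for i in range(len(arr)):
--         v = arr[i]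
--         k = 0
--         while True:
--             if v >= 50 and v % 2 == 0:
--                 w = v // 2
--             elif v < 50 and v % 2 == 1:
--                 w = v * 2 + 1
--             else:
--                 w = v
--             if w == v:
--                 break
--             v = w
--             k += 1
--         arr[i] = v
--         if k > best:
--             best = k
--     return best
-- ===== Notes on version B (the rewrite author's own statement) =====
-- stated objective: alternative
-- what changed: Replaces A's whole-array copy/compare stabilization passes (re-scanning every element each pass) with independent per-element fixed-point simulations whose maximum step count is the answer.
import Mathlib
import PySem

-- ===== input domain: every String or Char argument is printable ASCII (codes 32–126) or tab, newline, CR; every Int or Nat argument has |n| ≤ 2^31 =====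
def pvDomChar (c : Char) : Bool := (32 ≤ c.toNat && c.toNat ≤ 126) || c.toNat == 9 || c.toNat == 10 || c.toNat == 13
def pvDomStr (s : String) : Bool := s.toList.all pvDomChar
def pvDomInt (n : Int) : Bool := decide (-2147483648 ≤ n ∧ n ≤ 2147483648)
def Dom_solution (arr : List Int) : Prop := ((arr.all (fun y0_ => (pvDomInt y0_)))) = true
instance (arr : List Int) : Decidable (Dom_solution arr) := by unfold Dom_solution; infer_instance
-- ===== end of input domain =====

-- B replaces A's whole-array copy/compare passes with per-element fixed-point simulations
-- (same max-pass-count result); both Pythons mutate arr to the same stabilized state.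


-- ===== PORT A =====
-- one pass of A's for-loop (each arr[i] is read and written exactly once, so it is a map)
def pvPassA (arr : List Int) : List Int :=
  arr.map (fun v =>
    if 50 ≤ v ∧ PySem.Int.mod v 2 = 0 then PySem.Int.floordiv v 2
    else if v < 50 ∧ PySem.Int.mod v 2 = 1 then v * 2 + 1
    else v)

-- A's 'while True' loop; the fuel is provably larger than the number of passes on Pre_ inputs
def pvLoopA : Nat → List Int → Int → Int
  | 0, _, count => count
  | n + 1, arr, count =>
    let temp := arr
    let arr' := pvPassA arr
    if temp = arr' then count else pvLoopA n arr' (count + 1)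

def solution (arr : List Int) : Int :=
  pvLoopA (arr.foldl (fun a v => a + v.natAbs) 100) arr 0

-- ===== PORT B =====
-- inner while-loop of B for one element: counts steps to the element's fixed point
def pvElem : Nat → Int → Int → Int
  | 0, _, k => k
  | n + 1, v, k =>
    let w := if 50 ≤ v ∧ PySem.Int.mod v 2 = 0 then PySem.Int.floordiv v 2
             else if v < 50 ∧ PySem.Int.mod v 2 = 1 then v * 2 + 1
             else v
    if w = v then k else pvElem n w (k + 1)

def solution_alt (arr : List Int) : Int :=
  arr.foldl (fun best v =>
    let k := pvElem (v.natAbs + 100) v 0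
    if best < k then k else best) 0

-- ===== PRECONDITION & SPEC =====
-- Pre_ excludes arrays containing an odd value below -1: there A's loop never stabilizes
-- (v -> 2*v+1 decreases forever), so the Python A never returns (and B diverges identically).
def Pre_solution (arr : List Int) : Prop := ∀ v ∈ arr, PySem.Int.mod v 2 = 1 → -1 ≤ v
instance (arr : List Int) : Decidable (Pre_solution arr) := by unfold Pre_solution; infer_instance
def pvWitness_solution : List Int := [50, 3, -1, 0, 99]

def Spec_solution (arr : List Int) (out : Int) : Prop := out = solution_alt arr
instance (arr : List Int) (out : Int) : Decidable (Spec_solution arr out) := by unfold Spec_solution; infer_instance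

-- ===== CLAIM (what is proved, stated in full; the proofs are below) =====
def Claim_equal_solution : Prop := ∀ (arr : List Int), Dom_solution arr → Pre_solution arr → Spec_solution arr (solution arr)

-- ===== LEMMAS AND PROOFS =====

-- the single-element transform both programs apply
def pvStep (v : Int) : Int :=
  if 50 ≤ v ∧ PySem.Int.mod v 2 = 0 then PySem.Int.floordiv v 2
  else if v < 50 ∧ PySem.Int.mod v 2 = 1 then v * 2 + 1
  else v

lemma pvStep_eq (v : Int) :
    pvStep v = if 50 ≤ v ∧ v % 2 = 0 then v / 2 else if v < 50 ∧ v % 2 = 1 then v * 2 + 1 else v := by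
  unfold pvStep
  rw [PySem.Int.mod_eq_emod_of_pos (a := v) (b := 2) (by omega),
    PySem.Int.floordiv_eq_ediv_of_pos (a := v) (b := 2) (by omega)]

def pvGood (v : Int) : Prop := PySem.Int.mod v 2 = 1 → -1 ≤ v

lemma pvGood_iff (v : Int) : pvGood v ↔ (v % 2 = 1 → -1 ≤ v) := by
  unfold pvGood
  rw [PySem.Int.mod_eq_emod_of_pos (a := v) (b := 2) (by omega)]

-- termination potential for the per-element iteration
def pvPhi (v : Int) : Nat :=
  if 50 ≤ v ∧ v % 2 = 0 then v.toNat + 50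
  else if v < 50 ∧ v % 2 = 1 ∧ 0 < v then (50 - v).toNat
  else 0

lemma pvGood_step (v : Int) (h : pvGood v) : pvGood (pvStep v) := by
  rw [pvGood_iff] at h ⊢
  rw [pvStep_eq]
  split_ifs with h1 h2 <;> omega

lemma pvPhi_step (v : Int) (h : pvGood v) (hne : pvStep v ≠ v) : pvPhi (pvStep v) < pvPhi v := by
  rw [pvGood_iff] at h
  rw [pvStep_eq] at hne ⊢
  unfold pvPhi
  split_ifs at hne ⊢ <;> omega

-- the exact number of transform steps element v needs (0 outside the good region)
def pvN (v : Int) : Nat :=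
  if h : (PySem.Int.mod v 2 = 1 → -1 ≤ v) ∧ pvStep v ≠ v then pvN (pvStep v) + 1 else 0
termination_by pvPhi v
decreasing_by exact pvPhi_step v h.1 h.2

lemma pvN_of_fix (v : Int) (he : pvStep v = v) : pvN v = 0 := by
  rw [pvN]
  simp [he]

lemma pvN_of_ne (v : Int) (hg : pvGood v) (he : pvStep v ≠ v) :
    pvN v = pvN (pvStep v) + 1 := by
  have hg' : PySem.Int.mod v 2 = 1 → -1 ≤ v := hg
  rw [pvN, dif_pos ⟨hg', he⟩]

lemma pvN_le_phi (v : Int) : pvN v ≤ pvPhi v := by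
  rw [pvN]
  split
  · rename_i h
    have h1 := pvN_le_phi (pvStep v)
    have h2 := pvPhi_step v h.1 h.2
    omega
  · omega
termination_by pvPhi v
decreasing_by rename_i h; exact pvPhi_step v h.1 h.2

lemma pvN_zero_iff (v : Int) (h : pvGood v) : pvN v = 0 ↔ pvStep v = v := by
  constructor
  · intro h0
    by_contra hne
    rw [pvN_of_ne v h hne] at h0
    omega
  · exact pvN_of_fix v

lemma pvN_step (v : Int) (h : pvGood v) : pvN (pvStep v) = pvN v - 1 := by
  by_cases he : pvStep v = v
  · rw [he, pvN_of_fix v he]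
  · rw [pvN_of_ne v h he]
    omega

lemma pvPhi_le (v : Int) : pvPhi v ≤ v.natAbs + 50 := by
  unfold pvPhi
  split_ifs <;> omega

-- B's inner loop computes pvN when the fuel suffices
lemma pvElem_eq (fuel : Nat) : ∀ (v : Int) (k : Int), pvGood v → pvN v ≤ fuel →
    pvElem fuel v k = k + (pvN v : Int) := by
  induction fuel with
  | zero =>
    intro v k hg hf
    have h0 : pvN v = 0 := by omega
    simp [pvElem, h0]
  | succ n ih =>
    intro v k hg hf
    have hstep : pvElem (n + 1) v k = if pvStep v = v then k else pvElem n (pvStep v) (k + 1) := rfl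
    rw [hstep]
    by_cases he : pvStep v = v
    · rw [if_pos he, pvN_of_fix v he]
      simp
    · rw [if_neg he, ih (pvStep v) (k + 1) (pvGood_step v hg)
        (by rw [pvN_of_ne v hg he] at hf; omega), pvN_of_ne v hg he]
      push_cast
      ring

-- the maximum step count over the array, as both programs compute it
def pvM (arr : List Int) : Nat := arr.foldl (fun m v => max m (pvN v)) 0

lemma pvM_cons (x : Int) (xs : List Int) :
    pvM (x :: xs) = xs.foldl (fun m v => max m (pvN v)) (max 0 (pvN x)) := rfl

lemma pvM_foldl (arr : List Int) : ∀ acc : Nat,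
    arr.foldl (fun m v => max m (pvN v)) acc = max acc (pvM arr) := by
  induction arr with
  | nil => intro acc; simp [pvM]
  | cons x xs ih =>
    intro acc
    have h1 : (x :: xs).foldl (fun m v => max m (pvN v)) acc
        = xs.foldl (fun m v => max m (pvN v)) (max acc (pvN x)) := rfl
    rw [h1, ih (max acc (pvN x)), pvM_cons, ih (max 0 (pvN x))]
    omega

lemma pvM_zero_iff (arr : List Int) : pvM arr = 0 ↔ ∀ v ∈ arr, pvN v = 0 := by
  induction arr with
  | nil => simp [pvM]
  | cons x xs ih =>
    rw [pvM_cons, pvM_foldl]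
    constructor
    · intro h v hv
      rcases List.mem_cons.1 hv with hv | hv
      · subst hv; omega
      · exact ih.1 (by omega) v hv
    · intro h
      have hx := h x (by simp)
      have := ih.2 (fun v hv => h v (by simp [hv]))
      omega

lemma pvPass_eq_map (arr : List Int) : pvPassA arr = arr.map pvStep := rfl

-- l.map f = l iff f fixes every element of l (small helper; not found in the library)
lemma pvMap_eq_self_iff (f : Int → Int) (l : List Int) :
    l.map f = l ↔ ∀ x ∈ l, f x = x := by
  induction l with
  | nil => simp
  | cons x xs ih =>
    simp only [List.map_cons, List.cons.injEq, List.mem_cons]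
    constructor
    · rintro ⟨h1, h2⟩ y hy
      rcases hy with rfl | hy
      · exact h1
      · exact ih.1 h2 y hy
    · intro h
      exact ⟨h x (Or.inl rfl), ih.2 (fun y hy => h y (Or.inr hy))⟩

lemma pvM_pass (arr : List Int) (hg : ∀ v ∈ arr, pvGood v) :
    pvM (pvPassA arr) = pvM arr - 1 := by
  rw [pvPass_eq_map]
  induction arr with
  | nil => simp [pvM]
  | cons x xs ih =>
    have hgx : pvGood x := hg x (by simp)
    have hgxs : ∀ v ∈ xs, pvGood v := fun v hv => hg v (by simp [hv])
    rw [List.map_cons, pvM_cons, pvM_cons, pvM_foldl, pvM_foldl, ih hgxs, pvN_step x hgx]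
    omega

lemma pvPass_self_iff (arr : List Int) (hg : ∀ v ∈ arr, pvGood v) :
    pvPassA arr = arr ↔ pvM arr = 0 := by
  rw [pvPass_eq_map, pvM_zero_iff, pvMap_eq_self_iff]
  constructor
  · intro h v hv
    exact (pvN_zero_iff v (hg v hv)).2 (h v hv)
  · intro h v hv
    exact (pvN_zero_iff v (hg v hv)).1 (h v hv)

lemma pvGood_pass (arr : List Int) (hg : ∀ v ∈ arr, pvGood v) :
    ∀ v ∈ pvPassA arr, pvGood v := by
  rw [pvPass_eq_map]
  intro v hv
  obtain ⟨w, hw, rfl⟩ := List.mem_map.1 hv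
  exact pvGood_step w (hg w hw)

-- A's pass loop counts exactly pvM passes when the fuel suffices
lemma pvLoopA_eq (fuel : Nat) : ∀ (arr : List Int) (count : Int),
    (∀ v ∈ arr, pvGood v) → pvM arr ≤ fuel →
    pvLoopA fuel arr count = count + (pvM arr : Int) := by
  induction fuel with
  | zero =>
    intro arr count hg hf
    have h0 : pvM arr = 0 := by omega
    simp [pvLoopA, h0]
  | succ n ih =>
    intro arr count hg hf
    have hstep : pvLoopA (n + 1) arr count =
        if arr = pvPassA arr then count else pvLoopA n (pvPassA arr) (count + 1) := rfl
    rw [hstep]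
    by_cases he : arr = pvPassA arr
    · have h0 : pvM arr = 0 := (pvPass_self_iff arr hg).1 he.symm
      rw [if_pos he, h0]
      simp
    · have hM0 : pvM arr ≠ 0 := fun h0 => he ((pvPass_self_iff arr hg).2 h0).symm
      have hMp := pvM_pass arr hg
      rw [if_neg he, ih (pvPassA arr) (count + 1) (pvGood_pass arr hg) (by omega), hMp]
      omega

-- the fuel A's port carries is at least pvM
lemma pvM_le_fuel (arr : List Int) (hg : ∀ v ∈ arr, pvGood v) :
    pvM arr ≤ arr.foldl (fun a v => a + v.natAbs) 100 := by
  have key : ∀ (l : List Int), (∀ v ∈ l, pvGood v) → ∀ (a1 a2 : Nat), a1 ≤ a2 → 50 ≤ a2 →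
      l.foldl (fun m v => max m (pvN v)) a1 ≤ l.foldl (fun a v => a + v.natAbs) a2 := by
    intro l
    induction l with
    | nil => intro _ a1 a2 h1 _; simpa using h1
    | cons x xs ih =>
      intro hg a1 a2 h1 h2
      simp only [List.foldl_cons]
      have hx : pvN x ≤ x.natAbs + 50 := le_trans (pvN_le_phi x) (pvPhi_le x)
      exact ih (fun v hv => hg v (by simp [hv])) (max a1 (pvN x)) (a2 + x.natAbs)
        (by omega) (by omega)
  exact key arr hg 0 100 (by omega) (by omega)

-- B's fold computes pvM
lemma solution_alt_eq (arr : List Int) (hg : ∀ v ∈ arr, pvGood v) :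
    solution_alt arr = (pvM arr : Int) := by
  unfold solution_alt
  have key : ∀ (l : List Int), (∀ v ∈ l, pvGood v) → ∀ (acc : Nat),
      l.foldl (fun best v =>
        let k := pvElem (v.natAbs + 100) v 0
        if best < k then k else best) ((acc : Nat) : Int)
      = ((l.foldl (fun m v => max m (pvN v)) acc : Nat) : Int) := by
    intro l
    induction l with
    | nil => intro _ acc; simp
    | cons x xs ih =>
      intro hgl acc
      have hgx : pvGood x := hgl x (by simp)
      have hk : pvElem (x.natAbs + 100) x 0 = (0 : Int) + (pvN x : Int) :=
        pvElem_eq (x.natAbs + 100) x 0 hgx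
          (le_trans (pvN_le_phi x) (by have := pvPhi_le x; omega))
      simp only [List.foldl_cons]
      have hmax : (if (acc : Int) < pvElem (x.natAbs + 100) x 0 then pvElem (x.natAbs + 100) x 0
          else (acc : Int)) = ((max acc (pvN x) : Nat) : Int) := by
        rw [hk]
        split_ifs <;> push_cast <;> omega
      rw [hmax]
      exact ih (fun v hv => hgl v (by simp [hv])) (max acc (pvN x))
  have h0 := key arr hg 0
  simpa [pvM] using h0

-- ===== VERDICT (by name: the statement is the Claim_ definition above) =====
theorem solution_spec : Claim_equal_solution := by
  intro arr _ hpre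
  have hg : ∀ v ∈ arr, pvGood v := hpre
  unfold Spec_solution solution
  rw [pvLoopA_eq _ arr 0 hg (pvM_le_fuel arr hg), solution_alt_eq arr hg]
  omega
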